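-- pv_equiv track=rewrite | github.com/cry999/AtCoder | beginner/089/C.py | march
-- ===== SOURCE A (Python) =====
-- def march(N: int, S: list) -> int:
--     d = {'M': 0, 'A': 0, 'R': 0, 'C': 0, 'H': 0}
--     for s in S:
--         k = ''
--         if s.startswith('M'):
--             k = 'M'
--         elif s.startswith('A'):
--             k = 'A'
--         elif s.startswith('R'):
--             k = 'R'
--         elif s.startswith('C'):
--             k = 'C'
--         elif s.startswith('H'):
--             k = 'H'
--         else:
--             continue
--         d[k] += 1
--
--     count = 0
--     val = list(d.values())
--     for i in range(5):
--         for j in range(i + 1, 5):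
--             for k in range(j + 1, 5):
--                 count += val[i] * val[j] * val[k]
--
--     return count
-- ===== SOURCE B (Python) =====
-- def march(N: int, S: list) -> int:
--     # power sums of the five MARCH initial-letter counts
--     p1 = p2 = p3 = 0
--     for ch in 'MARCH':
--         c = 0
--         for s in S:
--             if s.startswith(ch):
--                 c += 1
--         p1 += c
--         p2 += c * c
--         p3 += c * c * c
--     # e3 of five numbers via Newton's identity (exact integer division)
--     return (p1 * p1 * p1 - 3 * p1 * p2 + 2 * p3) // 6
-- ===== Notes on version B (the rewrite author's own statement) =====
-- stated objective: simpler
-- what changed: Replaces the dict of five buckets and the C(5,3) triple nested loop by per-letter counts and the closed form (p1^3-3*p1*p2+2*p3)//6 for the elementary symmetric sum e3.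
import Mathlib
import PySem

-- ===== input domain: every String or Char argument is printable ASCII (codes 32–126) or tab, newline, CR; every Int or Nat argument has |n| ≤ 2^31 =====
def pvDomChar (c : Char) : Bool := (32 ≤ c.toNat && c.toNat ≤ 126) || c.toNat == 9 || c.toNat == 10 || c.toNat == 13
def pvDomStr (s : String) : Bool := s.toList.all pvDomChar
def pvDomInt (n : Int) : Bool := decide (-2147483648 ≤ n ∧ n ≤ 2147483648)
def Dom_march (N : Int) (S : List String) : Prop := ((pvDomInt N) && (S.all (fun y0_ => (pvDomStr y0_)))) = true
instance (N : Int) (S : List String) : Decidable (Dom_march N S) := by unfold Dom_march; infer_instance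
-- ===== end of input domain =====

-- B replaces A's five-bucket dict and C(5,3) triple nested loop by per-letter counts and the
-- closed-form symmetric-polynomial identity e3 = (p1^3 - 3*p1*p2 + 2*p3)//6 (objective: simpler).

-- ===== PORT A =====
def marchStep (d : PySem.Dict String Int) (s : String) : PySem.Dict String Int :=
  if PySem.Str.startswith s "M" then d.modify "M" 0 (· + 1)
  else if PySem.Str.startswith s "A" then d.modify "A" 0 (· + 1)
  else if PySem.Str.startswith s "R" then d.modify "R" 0 (· + 1)
  else if PySem.Str.startswith s "C" then d.modify "C" 0 (· + 1)
  else if PySem.Str.startswith s "H" then d.modify "H" 0 (· + 1)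
  else d

def march (N : Int) (S : List String) : Int :=
  let d : PySem.Dict String Int :=
    S.foldl marchStep (PySem.Dict.ofList [("M", 0), ("A", 0), ("R", 0), ("C", 0), ("H", 0)])
  let val := d.values
  (PySem.List.pyRange 0 5 1).foldl (fun count i =>
    (PySem.List.pyRange (i + 1) 5 1).foldl (fun count j =>
      (PySem.List.pyRange (j + 1) 5 1).foldl (fun count k =>
        count + PySem.List.pyGetD val i 0 * PySem.List.pyGetD val j 0 * PySem.List.pyGetD val k 0)
        count) count) 0

-- ===== PORT B =====
def march_alt (N : Int) (S : List String) : Int :=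
  let p : Int × Int × Int :=
    ["M", "A", "R", "C", "H"].foldl (fun p ch =>
      let c : Int := S.foldl (fun c s => if PySem.Str.startswith s ch then c + 1 else c) 0
      (p.1 + c, p.2.1 + c * c, p.2.2 + c * c * c)) (0, 0, 0)
  PySem.Int.floordiv (p.1 * p.1 * p.1 - 3 * p.1 * p.2.1 + 2 * p.2.2) 6

-- ===== PRECONDITION & SPEC =====
def Spec_march (N : Int) (S : List String) (out : Int) : Prop := out = march_alt N S
instance (N : Int) (S : List String) (out : Int) : Decidable (Spec_march N S out) := by unfold Spec_march; infer_instance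

-- ===== CLAIM (what is proved, stated in full; the proofs are below) =====
def Claim_equal_march : Prop := ∀ (N : Int) (S : List String), Dom_march N S → Spec_march N S (march N S)

-- ===== LEMMAS AND PROOFS =====

-- count of strings in S starting with the one-character string ch
def cnt (ch : String) (S : List String) : Int :=
  (S.countP (fun s => PySem.Str.startswith s ch) : Int)

-- two DISTINCT single-character prefixes cannot both be prefixes of the same string
lemma sw_excl (l : List Char) (c1 c2 : Char) (h : c1 ≠ c2)
    (h1 : PySem.Chars.startswith l [c1] = true) :
    PySem.Chars.startswith l [c2] = false := by
  rw [PySem.Chars.startswith_iff] at h1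
  rw [Bool.eq_false_iff]
  intro h2
  rw [PySem.Chars.startswith_iff] at h2
  obtain ⟨t1, e1⟩ := h1
  obtain ⟨t2, e2⟩ := h2
  rw [← e1] at e2
  exact h (List.cons.inj e2).1.symm

lemma tlM : "M".toList = ['M'] := rfl
lemma tlA : "A".toList = ['A'] := rfl
lemma tlR : "R".toList = ['R'] := rfl
lemma tlC : "C".toList = ['C'] := rfl
lemma tlH : "H".toList = ['H'] := rfl

-- dict-fold invariant: the bucket dict keeps its five keys in order, each value grows by its count
lemma dict_values (S : List String) (m a r c h : Int) :
    (S.foldl marchStep (PySem.Dict.mk [("M", m), ("A", a), ("R", r), ("C", c), ("H", h)])).values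
      = [m + cnt "M" S, a + cnt "A" S, r + cnt "R" S, c + cnt "C" S, h + cnt "H" S] := by
  induction S generalizing m a r c h with
  | nil => simp [cnt, PySem.Dict.values]
  | cons s S ih =>
    simp only [List.foldl_cons, marchStep]
    split_ifs with h1 h2 h3 h4 h5
    · simp only [PySem.Str.startswith_eq, tlM] at h1
      have eA := sw_excl s.toList 'M' 'A' (by decide) h1
      have eR := sw_excl s.toList 'M' 'R' (by decide) h1
      have eC := sw_excl s.toList 'M' 'C' (by decide) h1
      have eH := sw_excl s.toList 'M' 'H' (by decide) h1
      simp [PySem.Dict.modify, PySem.Dict.insert, PySem.Dict.getD, PySem.Dict.get?,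
        PySem.Dict.contains, ih, cnt, List.countP_cons, h1, eA, eR, eC, eH]
      omega
    · simp only [PySem.Str.startswith_eq, tlM, tlA] at h1 h2
      have eM := sw_excl s.toList 'A' 'M' (by decide) h2
      have eR := sw_excl s.toList 'A' 'R' (by decide) h2
      have eC := sw_excl s.toList 'A' 'C' (by decide) h2
      have eH := sw_excl s.toList 'A' 'H' (by decide) h2
      simp [PySem.Dict.modify, PySem.Dict.insert, PySem.Dict.getD, PySem.Dict.get?,
        PySem.Dict.contains, ih, cnt, List.countP_cons, h2, eM, eR, eC, eH]
      omega
    · simp only [PySem.Str.startswith_eq, tlM, tlA, tlR] at h1 h2 h3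
      have eM := sw_excl s.toList 'R' 'M' (by decide) h3
      have eA := sw_excl s.toList 'R' 'A' (by decide) h3
      have eC := sw_excl s.toList 'R' 'C' (by decide) h3
      have eH := sw_excl s.toList 'R' 'H' (by decide) h3
      simp [PySem.Dict.modify, PySem.Dict.insert, PySem.Dict.getD, PySem.Dict.get?,
        PySem.Dict.contains, ih, cnt, List.countP_cons, h3, eM, eA, eC, eH]
      omega
    · simp only [PySem.Str.startswith_eq, tlM, tlA, tlR, tlC] at h1 h2 h3 h4
      have eM := sw_excl s.toList 'C' 'M' (by decide) h4
      have eA := sw_excl s.toList 'C' 'A' (by decide) h4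
      have eR := sw_excl s.toList 'C' 'R' (by decide) h4
      have eH := sw_excl s.toList 'C' 'H' (by decide) h4
      simp [PySem.Dict.modify, PySem.Dict.insert, PySem.Dict.getD, PySem.Dict.get?,
        PySem.Dict.contains, ih, cnt, List.countP_cons, h4, eM, eA, eR, eH]
      omega
    · simp only [PySem.Str.startswith_eq, tlM, tlA, tlR, tlC, tlH] at h1 h2 h3 h4 h5
      have eM := sw_excl s.toList 'H' 'M' (by decide) h5
      have eA := sw_excl s.toList 'H' 'A' (by decide) h5
      have eR := sw_excl s.toList 'H' 'R' (by decide) h5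
      have eC := sw_excl s.toList 'H' 'C' (by decide) h5
      simp [PySem.Dict.modify, PySem.Dict.insert, PySem.Dict.getD, PySem.Dict.get?,
        PySem.Dict.contains, ih, cnt, List.countP_cons, h5, eM, eA, eR, eC]
      omega
    · simp only [PySem.Str.startswith_eq, tlM, tlA, tlR, tlC, tlH] at h1 h2 h3 h4 h5
      simp [ih, cnt, List.countP_cons, h1, h2, h3, h4, h5]

-- B's inner fold is the count
lemma foldl_count (S : List String) (ch : String) (c0 : Int) :
    S.foldl (fun c s => if PySem.Str.startswith s ch then c + 1 else c) c0 = c0 + cnt ch S := by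
  induction S generalizing c0 with
  | nil => simp [cnt]
  | cons s S ih =>
    simp only [List.foldl_cons]
    rw [ih]
    simp only [cnt, List.countP_cons, PySem.Str.startswith_eq]
    split_ifs with h <;> simp [h] <;> omega

-- A's triple loop over a five-element list is the elementary symmetric sum e3
lemma triple_loop (v0 v1 v2 v3 v4 : Int) :
    (PySem.List.pyRange 0 5 1).foldl (fun count i =>
      (PySem.List.pyRange (i + 1) 5 1).foldl (fun count j =>
        (PySem.List.pyRange (j + 1) 5 1).foldl (fun count k =>
          count + PySem.List.pyGetD [v0, v1, v2, v3, v4] i 0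
                * PySem.List.pyGetD [v0, v1, v2, v3, v4] j 0
                * PySem.List.pyGetD [v0, v1, v2, v3, v4] k 0) count) count) 0
    = v0*v1*v2 + v0*v1*v3 + v0*v1*v4 + v0*v2*v3 + v0*v2*v4 + v0*v3*v4
      + v1*v2*v3 + v1*v2*v4 + v1*v3*v4 + v2*v3*v4 := by
  have r0 : PySem.List.pyRange 0 5 1 = [0, 1, 2, 3, 4] := by decide
  have r1 : PySem.List.pyRange 1 5 1 = [1, 2, 3, 4] := by decide
  have r2 : PySem.List.pyRange 2 5 1 = [2, 3, 4] := by decide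
  have r3 : PySem.List.pyRange 3 5 1 = [3, 4] := by decide
  have r4 : PySem.List.pyRange 4 5 1 = [4] := by decide
  have r5 : PySem.List.pyRange 5 5 1 = [] := by decide
  simp [r0, r1, r2, r3, r4, r5, List.foldl, PySem.List.pyGetD, PySem.List.pyIdx?, PySem.List.pyGet?]

-- Newton's identity: 6*e3 = p1^3 - 3*p1*p2 + 2*p3, and the floor division is exact
lemma newton (a b c d e : Int) :
    a*b*c + a*b*d + a*b*e + a*c*d + a*c*e + a*d*e + b*c*d + b*c*e + b*d*e + c*d*e
      = PySem.Int.floordiv ((a+b+c+d+e) * (a+b+c+d+e) * (a+b+c+d+e)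
          - 3 * (a+b+c+d+e) * (a*a + b*b + c*c + d*d + e*e)
          + 2 * (a*a*a + b*b*b + c*c*c + d*d*d + e*e*e)) 6 := by
  have h6 : (0 : Int) < 6 := by norm_num
  have he : (a+b+c+d+e) * (a+b+c+d+e) * (a+b+c+d+e)
          - 3 * (a+b+c+d+e) * (a*a + b*b + c*c + d*d + e*e)
          + 2 * (a*a*a + b*b*b + c*c*c + d*d*d + e*e*e)
      = 6 * (a*b*c + a*b*d + a*b*e + a*c*d + a*c*e + a*d*e + b*c*d + b*c*e + b*d*e + c*d*e) := by
    ring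
  rw [he, PySem.Int.floordiv_eq_ediv_of_pos h6, Int.mul_ediv_cancel_left _ (by norm_num : (6:Int) ≠ 0)]

-- ===== VERDICT (by name: the statement is the Claim_ definition above) =====
theorem march_spec : Claim_equal_march := by
  intro N S _
  unfold Spec_march march march_alt
  have hd : PySem.Dict.ofList [("M", (0:Int)), ("A", 0), ("R", 0), ("C", 0), ("H", 0)]
      = PySem.Dict.mk [("M", 0), ("A", 0), ("R", 0), ("C", 0), ("H", 0)] := by decide
  simp only [hd, dict_values, foldl_count, List.foldl_cons, List.foldl_nil]
  simp only [zero_add, triple_loop]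
  exact newton (cnt "M" S) (cnt "A" S) (cnt "R" S) (cnt "C" S) (cnt "H" S)
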